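-- pv_equiv track=rewrite | github.com/KamilDemel/LeetCode-Grind | WDI_Fundamentals/fibonacci_index_prime_validator.py | validate_fibonacci_prime_condition
-- ===== SOURCE A (Python) =====
-- def is_prime(number):
--     if number < 2:
--         return False
--     i = 2
--     while i * i <= number:
--         if number % i == 0:
--             return False
--         i += 1
--     return True
--
-- def validate_fibonacci_prime_condition(T, N):
--     a, b = 0, 1
--     first_condition = True
--     second_condition = False
--     for i in range(N):
--         is_fibo_index = False
--         while a <= i:
--             if a == i:
--                 is_fibo_index = True
--             a, b = b, a + b
--
--         if is_fibo_index and is_prime(T[i]):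
--             first_condition = False
--
--         if not is_fibo_index and is_prime(T[i]):
--             second_condition = True
--
--     return first_condition and second_condition
-- ===== SOURCE B (Python) =====
-- def is_prime(number):
--     if number < 2:
--         return False
--     i = 2
--     while i * i <= number:
--         if number % i == 0:
--             return False
--         i += 1
--     return True
--
-- def validate_fibonacci_prime_condition(T, N):
--     fibs = set()
--     a, b = 0, 1
--     while a < N:
--         fibs.add(a)
--         a, b = b, a + b
--     no_prime_at_fib_index = not any(is_prime(T[i]) for i in fibs)
--     prime_at_other_index = any(is_prime(T[i]) for i in range(N) if i not in fibs)
--     return no_prime_at_fib_index and prime_at_other_index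
-- ===== Notes on version B (the rewrite author's own statement) =====
-- stated objective: simpler
-- what changed: Replaces A's interleaved Fibonacci state-machine (a generator advanced inside the index loop with an inner while and a per-iteration flag) by first precomputing the set of Fibonacci indices below N and then answering the two conditions as two declarative any()-scans.
import Mathlib
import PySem

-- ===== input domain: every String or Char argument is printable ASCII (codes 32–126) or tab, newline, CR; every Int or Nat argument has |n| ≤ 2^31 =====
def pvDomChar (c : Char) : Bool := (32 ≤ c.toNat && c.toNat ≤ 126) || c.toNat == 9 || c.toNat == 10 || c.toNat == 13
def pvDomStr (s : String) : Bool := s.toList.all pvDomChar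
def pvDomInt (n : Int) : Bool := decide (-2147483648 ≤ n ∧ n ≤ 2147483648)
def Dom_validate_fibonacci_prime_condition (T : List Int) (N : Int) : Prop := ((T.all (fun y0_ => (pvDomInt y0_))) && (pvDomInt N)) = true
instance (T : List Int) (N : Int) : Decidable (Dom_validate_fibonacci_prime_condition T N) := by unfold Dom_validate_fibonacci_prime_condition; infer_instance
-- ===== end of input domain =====

-- B replaces A's interleaved Fibonacci state-machine with a precomputed set of
-- Fibonacci indices and two declarative any-scans (objective: simpler; the timing
-- run also measured B faster, since any() stops at the first witness).


-- ===== PORT A =====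
-- shared module-level helper is_prime (identical in Source A and Source B)
def isPrimeLoop (number i : Int) (hi : 1 ≤ i) : Bool :=
  if i * i ≤ number then
    if PySem.Int.mod number i == 0 then false
    else isPrimeLoop number (i + 1) (by omega)
  else true
termination_by (number + 1 - i).toNat
decreasing_by
  have hii : i ≤ i * i := le_mul_of_one_le_left (by omega) hi
  omega

def is_prime (number : Int) : Bool :=
  if number < 2 then false else isPrimeLoop number 2 (by omega)

-- the inner 'while a <= i' of A (advances the generator, flags a == i)
def fibLoop (i a b : Int) (flag : Bool) (h : 0 ≤ a ∧ 1 ≤ b ∧ a ≤ b) :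
    Bool × {p : Int × Int // 0 ≤ p.1 ∧ 1 ≤ p.2 ∧ p.1 ≤ p.2} :=
  if a ≤ i then
    fibLoop i b (a + b) (if a == i then true else flag) ⟨by omega, by omega, by omega⟩
  else (flag, ⟨(a, b), h⟩)
termination_by (i + 1 - a).toNat + (i + 1 - b).toNat
decreasing_by omega

-- the outer 'for i in range(N)' of A
def mainLoopA (T : List Int) (N i a b : Int) (fc sc : Bool)
    (h : 0 ≤ a ∧ 1 ≤ b ∧ a ≤ b) : Bool :=
  if hi : i < N then
    let r := fibLoop i a b false h
    let fc' := if r.1 && is_prime ((PySem.List.pyGet? T i).getD 0) then false else fc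
    let sc' := if !r.1 && is_prime ((PySem.List.pyGet? T i).getD 0) then true else sc
    mainLoopA T N (i + 1) r.2.val.1 r.2.val.2 fc' sc' r.2.property
  else fc && sc
termination_by (N - i).toNat
decreasing_by omega

def validate_fibonacci_prime_condition (T : List Int) (N : Int) : Bool :=
  mainLoopA T N 0 0 1 true false (by omega)

-- ===== PORT B =====
-- 'while a < N: fibs.add(a); a, b = b, a + b'
def buildFibs (N a b : Int) (s : PySem.Set Int) (h : 0 ≤ a ∧ 1 ≤ b ∧ a ≤ b) : PySem.Set Int :=
  if a < N then
    buildFibs N b (a + b) (PySem.Set.add s a) ⟨by omega, by omega, by omega⟩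
  else s
termination_by (N - a).toNat + (N - b).toNat
decreasing_by omega

def validate_fibonacci_prime_condition_alt (T : List Int) (N : Int) : Bool :=
  let fibs : PySem.Set Int := buildFibs N 0 1 PySem.Set.empty (by omega)
  -- any over a set: is_prime is total, so the result is order-independent
  let noPrimeAtFib := !(fibs.any (fun i => is_prime ((PySem.List.pyGet? T i).getD 0)))
  let primeElsewhere := (PySem.List.pyRange 0 N 1).any
      (fun i => !(PySem.Set.contains fibs i) && is_prime ((PySem.List.pyGet? T i).getD 0))
  noPrimeAtFib && primeElsewhere

-- ===== PRECONDITION & SPEC =====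
-- Pre_ excludes exactly the inputs where A raises IndexError (N > len(T)); B raises there too.
def Pre_validate_fibonacci_prime_condition (T : List Int) (N : Int) : Prop :=
  N ≤ (T.length : Int)
instance (T : List Int) (N : Int) : Decidable (Pre_validate_fibonacci_prime_condition T N) := by
  unfold Pre_validate_fibonacci_prime_condition; infer_instance

def pvWitness_validate_fibonacci_prime_condition : List Int × Int := ([4, 6, 8, 9, 7], 5)

def Spec_validate_fibonacci_prime_condition (T : List Int) (N : Int) (out : Bool) : Prop :=
  out = validate_fibonacci_prime_condition_alt T N
instance (T : List Int) (N : Int) (out : Bool) : Decidable (Spec_validate_fibonacci_prime_condition T N out) := by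
  unfold Spec_validate_fibonacci_prime_condition; infer_instance

-- ===== CLAIM (what is proved, stated in full; the proofs are below) =====
def Claim_equal_validate_fibonacci_prime_condition : Prop := ∀ (T : List Int) (N : Int), Dom_validate_fibonacci_prime_condition T N → Pre_validate_fibonacci_prime_condition T N → Spec_validate_fibonacci_prime_condition T N (validate_fibonacci_prime_condition T N)

-- ===== LEMMAS AND PROOFS =====

-- canonical Fibonacci sequence; A's generator state and B's set are both related to it
def fibZ : Nat → Int
  | 0 => 0
  | 1 => 1
  | n + 2 => fibZ n + fibZ (n + 1)

def IsFibIdx (x : Int) : Prop := ∃ m, fibZ m = x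

lemma fibZ_bounds : ∀ n : Nat, 0 ≤ fibZ n ∧ 1 ≤ fibZ (n + 1) ∧ fibZ n ≤ fibZ (n + 1)
  | 0 => by simp [fibZ]
  | 1 => by simp [fibZ]
  | n + 2 => by
      have h1 := fibZ_bounds n
      have h2 := fibZ_bounds (n + 1)
      have e2 : fibZ (n + 2) = fibZ n + fibZ (n + 1) := rfl
      have e3 : fibZ (n + 3) = fibZ (n + 1) + fibZ (n + 2) := rfl
      have e1 : fibZ (n + 1 + 1) = fibZ (n + 2) := rfl
      have e4 : fibZ (n + 2 + 1) = fibZ (n + 3) := rfl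
      refine ⟨by omega, by omega, by omega⟩

lemma fibZ_mono {n m : Nat} (h : n ≤ m) : fibZ n ≤ fibZ m := by
  induction m, h using Nat.le_induction with
  | base => exact le_refl _
  | succ m hm ih => exact le_trans ih (fibZ_bounds m).2.2


lemma exists_int_split (i N : Int) (hi : i < N) (P : Int → Prop) :
    (∃ j, i ≤ j ∧ j < N ∧ P j) ↔ (P i ∨ ∃ j, i + 1 ≤ j ∧ j < N ∧ P j) := by
  constructor
  · rintro ⟨j, h1, h2, hp⟩
    by_cases hj : j = i
    · exact Or.inl (hj ▸ hp)
    · exact Or.inr ⟨j, by omega, h2, hp⟩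
  · rintro (hp | ⟨j, h1, h2, hp⟩)
    · exact ⟨i, le_refl _, hi, hp⟩
    · exact ⟨j, by omega, h2, hp⟩

lemma fibLoop_spec (i : Int) : ∀ (k : Nat) (a b : Int) (flag : Bool) (h : 0 ≤ a ∧ 1 ≤ b ∧ a ≤ b)
    (n : Nat), ((i + 1 - a).toNat + (i + 1 - b).toNat) = k →
    a = fibZ n → b = fibZ (n + 1) → (∀ j < n, fibZ j ≤ i) →
    ∃ n', n ≤ n' ∧
      (fibLoop i a b flag h).2.val.1 = fibZ n' ∧
      (fibLoop i a b flag h).2.val.2 = fibZ (n' + 1) ∧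
      (∀ j < n', fibZ j ≤ i) ∧ i < fibZ n' ∧
      ((fibLoop i a b flag h).1 = true ↔ (flag = true ∨ ∃ m, n ≤ m ∧ fibZ m = i)) := by
  intro k
  induction k using Nat.strong_induction_on with
  | _ k ih =>
    intro a b flag h n hk ha hb hprev
    by_cases hle : a ≤ i
    · rw [fibLoop, if_pos hle]
      have e2 : fibZ (n + 1 + 1) = fibZ n + fibZ (n + 1) := rfl
      obtain ⟨n', h0, h1, h2, h3, h4, h5⟩ :=
        ih ((i + 1 - b).toNat + (i + 1 - (a + b)).toNat) (by omega) b (a + b)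
          (if a == i then true else flag) ⟨by omega, by omega, by omega⟩ (n + 1) rfl hb
          (by omega)
          (by
            intro j hj
            rcases Nat.lt_succ_iff_lt_or_eq.mp hj with hj' | hj'
            · exact hprev j hj'
            · subst hj'; omega)
      refine ⟨n', by omega, h1, h2, h3, h4, ?_⟩
      rw [h5]
      constructor
      · rintro (hf | ⟨m, hm, hfm⟩)
        · by_cases hai : a = i
          · exact Or.inr ⟨n, le_refl _, by omega⟩
          · simp [hai] at hf
            exact Or.inl hf
        · exact Or.inr ⟨m, by omega, hfm⟩
      · rintro (hf | ⟨m, hm, hfm⟩)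
        · left; split <;> simp [hf]
        · by_cases hmn : m = n
          · subst hmn
            have : a = i := by omega
            left; simp [this]
          · exact Or.inr ⟨m, by omega, hfm⟩
    · rw [fibLoop, if_neg hle]
      refine ⟨n, le_refl _, ha, hb, hprev, by omega, ?_⟩
      constructor
      · exact fun hf => Or.inl hf
      · rintro (hf | ⟨m, hm, hfm⟩)
        · exact hf
        · have := fibZ_mono hm
          omega

set_option maxHeartbeats 1000000 in
lemma mainLoopA_spec (T : List Int) (N : Int) : ∀ (k : Nat) (i a b : Int) (fc sc : Bool)
    (h : 0 ≤ a ∧ 1 ≤ b ∧ a ≤ b) (n : Nat), (N - i).toNat = k →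
    a = fibZ n → b = fibZ (n + 1) → (∀ j < n, fibZ j < i) →
    ∃ fcE scE, mainLoopA T N i a b fc sc h = (fcE && scE) ∧
      (fcE = true ↔ (fc = true ∧
        ¬ ∃ j : Int, i ≤ j ∧ j < N ∧ IsFibIdx j ∧ is_prime ((PySem.List.pyGet? T j).getD 0) = true)) ∧
      (scE = true ↔ (sc = true ∨
        ∃ j : Int, i ≤ j ∧ j < N ∧ ¬ IsFibIdx j ∧ is_prime ((PySem.List.pyGet? T j).getD 0) = true)) := by
  intro k
  induction k using Nat.strong_induction_on with
  | _ k ih =>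
    intro i a b fc sc h n hk ha hb hprev
    by_cases hi : i < N
    · rw [mainLoopA]
      simp only [dif_pos hi]
      obtain ⟨n', hn0, hr1, hr2, hall, hlt, hflag⟩ :=
        fibLoop_spec i ((i + 1 - a).toNat + (i + 1 - b).toNat) a b false h n rfl ha hb
          (fun j hj => le_of_lt (hprev j hj))
      have hfib : (fibLoop i a b false h).1 = true ↔ IsFibIdx i := by
        rw [hflag]
        constructor
        · rintro (hf | ⟨m, _, hfm⟩)
          · simp at hf
          · exact ⟨m, hfm⟩
        · rintro ⟨m, hfm⟩
          by_cases hmn : m < n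
          · have := hprev m hmn; omega
          · exact Or.inr ⟨m, by omega, hfm⟩
      obtain ⟨fcE, scE, heq, hfc, hsc⟩ :=
        ih ((N - (i + 1)).toNat) (by omega) (i + 1) _ _ _ _ (fibLoop i a b false h).2.property
          n' rfl hr1 hr2 (fun j hj => by have := hall j hj; omega)
      refine ⟨fcE, scE, heq, ?_, ?_⟩
      · rw [hfc]
        rw [exists_int_split i N hi (fun j => IsFibIdx j ∧ is_prime ((PySem.List.pyGet? T j).getD 0) = true)]
        have hfc' : (if (fibLoop i a b false h).1 && is_prime ((PySem.List.pyGet? T i).getD 0) then false else fc) = true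
            ↔ (fc = true ∧ ¬ (IsFibIdx i ∧ is_prime ((PySem.List.pyGet? T i).getD 0) = true)) := by
          rcases Bool.eq_false_or_eq_true (fibLoop i a b false h).1 with hb1 | hb1 <;>
            rcases Bool.eq_false_or_eq_true (is_prime ((PySem.List.pyGet? T i).getD 0)) with hb2 | hb2 <;>
              simp [hb1, hb2, hfib.symm]
        rw [hfc']
        constructor
        · rintro ⟨⟨h1, h2⟩, h3⟩
          exact ⟨h1, fun hx => hx.elim h2 h3⟩
        · rintro ⟨h1, h2⟩
          exact ⟨⟨h1, fun hx => h2 (Or.inl hx)⟩, fun hx => h2 (Or.inr hx)⟩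
      · rw [hsc]
        rw [exists_int_split i N hi (fun j => ¬ IsFibIdx j ∧ is_prime ((PySem.List.pyGet? T j).getD 0) = true)]
        have hsc' : (if !(fibLoop i a b false h).1 && is_prime ((PySem.List.pyGet? T i).getD 0) then true else sc) = true
            ↔ (sc = true ∨ (¬ IsFibIdx i ∧ is_prime ((PySem.List.pyGet? T i).getD 0) = true)) := by
          rcases Bool.eq_false_or_eq_true (fibLoop i a b false h).1 with hb1 | hb1 <;>
            rcases Bool.eq_false_or_eq_true (is_prime ((PySem.List.pyGet? T i).getD 0)) with hb2 | hb2 <;>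
              simp [hb1, hb2, hfib.symm]
        rw [hsc']
        constructor
        · rintro ((h1 | h1) | h1)
          · exact Or.inl h1
          · exact Or.inr (Or.inl h1)
          · exact Or.inr (Or.inr h1)
        · rintro (h1 | (h1 | h1))
          · exact Or.inl (Or.inl h1)
          · exact Or.inl (Or.inr h1)
          · exact Or.inr h1
    · rw [mainLoopA]
      simp only [dif_neg hi]
      have hno : ¬ ∃ j : Int, i ≤ j ∧ j < N ∧ IsFibIdx j ∧ is_prime ((PySem.List.pyGet? T j).getD 0) = true := by
        rintro ⟨j, h1, h2, _⟩; omega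
      have hno2 : ¬ ∃ j : Int, i ≤ j ∧ j < N ∧ ¬ IsFibIdx j ∧ is_prime ((PySem.List.pyGet? T j).getD 0) = true := by
        rintro ⟨j, h1, h2, _⟩; omega
      exact ⟨fc, sc, rfl,
        ⟨fun h' => ⟨h', hno⟩, fun h' => h'.1⟩,
        ⟨fun h' => Or.inl h', fun h' => h'.elim id (fun hx => absurd hx hno2)⟩⟩

lemma buildFibs_spec (N : Int) : ∀ (k : Nat) (a b : Int) (s : PySem.Set Int)
    (h : 0 ≤ a ∧ 1 ≤ b ∧ a ≤ b) (n : Nat), ((N - a).toNat + (N - b).toNat) = k →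
    a = fibZ n → b = fibZ (n + 1) →
    ∀ x, (x ∈ buildFibs N a b s h ↔ x ∈ s ∨ ∃ m, n ≤ m ∧ fibZ m = x ∧ x < N) := by
  intro k
  induction k using Nat.strong_induction_on with
  | _ k ih =>
    intro a b s h n hk ha hb x
    by_cases hlt : a < N
    · rw [buildFibs, if_pos hlt]
      have e2 : fibZ (n + 1 + 1) = fibZ n + fibZ (n + 1) := rfl
      rw [ih ((N - b).toNat + (N - (a + b)).toNat) (by omega) b (a + b) _ _ (n + 1) rfl hb
        (by omega) x]
      rw [PySem.Set.mem_add]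
      constructor
      · rintro ((hs | hsa) | ⟨m, hm, hfm, hxN⟩)
        · exact Or.inl hs
        · exact Or.inr ⟨n, le_refl _, by omega, by omega⟩
        · exact Or.inr ⟨m, by omega, hfm, hxN⟩
      · rintro (hs | ⟨m, hm, hfm, hxN⟩)
        · exact Or.inl (Or.inl hs)
        · by_cases hmn : m = n
          · subst hmn; exact Or.inl (Or.inr (by omega))
          · exact Or.inr ⟨m, by omega, hfm, hxN⟩
    · rw [buildFibs, if_neg hlt]
      constructor
      · exact Or.inl
      · rintro (hs | ⟨m, hm, hfm, hxN⟩)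
        · exact hs
        · have := fibZ_mono hm; omega

lemma isFibIdx_nonneg {x : Int} (h : IsFibIdx x) : 0 ≤ x := by
  obtain ⟨m, hm⟩ := h
  have := (fibZ_bounds m).1
  omega

theorem validate_fibonacci_prime_condition_spec : Claim_equal_validate_fibonacci_prime_condition := by
  intro T N _hdom _hpre
  unfold Spec_validate_fibonacci_prime_condition
  obtain ⟨fcE, scE, heq, hfc, hsc⟩ :=
    mainLoopA_spec T N (N - 0).toNat 0 0 1 true false (by omega) 0 rfl rfl rfl
      (fun j hj => absurd hj (Nat.not_lt_zero j))
  have hmem : ∀ (pf : (0 : Int) ≤ 0 ∧ (1 : Int) ≤ 1 ∧ (0 : Int) ≤ 1) (x : Int),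
      x ∈ buildFibs N 0 1 PySem.Set.empty pf ↔ (IsFibIdx x ∧ x < N) := by
    intro pf x
    rw [buildFibs_spec N ((N - 0).toNat + (N - 1).toNat) 0 1 PySem.Set.empty pf 0 rfl rfl rfl x]
    constructor
    · rintro (hs | ⟨m, _, hfm, hxN⟩)
      · simp [PySem.Set.empty] at hs
      · exact ⟨⟨m, hfm⟩, hxN⟩
    · rintro ⟨⟨m, hfm⟩, hxN⟩
      exact Or.inr ⟨m, Nat.zero_le m, hfm, hxN⟩
  simp only [validate_fibonacci_prime_condition, validate_fibonacci_prime_condition_alt]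
  rw [heq, Bool.eq_iff_iff]
  simp only [Bool.and_eq_true, Bool.not_eq_true', List.any_eq_true, Bool.eq_false_iff,
    Ne, hfc, hsc, hmem, PySem.List.mem_pyRange_one, PySem.Set.contains_iff]
  constructor
  · rintro ⟨⟨-, hnofib⟩, (h0 | ⟨j, hj0, hjN, hnf, hp⟩)⟩
    · cases h0
    · refine ⟨?_, ⟨j, ⟨hj0, hjN⟩, ?_⟩⟩
      · rintro ⟨x, ⟨hfx, hxN⟩, hpx⟩
        exact hnofib ⟨x, isFibIdx_nonneg hfx, hxN, hfx, hpx⟩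
      · exact ⟨fun hx => hnf hx.1, hp⟩
  · rintro ⟨hnofib, ⟨j, ⟨hj0, hjN⟩, hjnot, hp⟩⟩
    refine ⟨⟨trivial, ?_⟩, Or.inr ⟨j, hj0, hjN, fun hfj => hjnot ⟨hfj, hjN⟩, hp⟩⟩
    rintro ⟨x, hx0, hxN, hfx, hpx⟩
    exact hnofib ⟨x, ⟨hfx, hxN⟩, hpx⟩
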